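-- pv_equiv track=rewrite | github.com/Oh-sh0502/TIL | Coding Test/Study Group/코딩테스트/라인_조직암호.py | Solution
-- ===== SOURCE A (Python) =====
-- def Solution(m,k):
--     result = []
--     d = [0] * len(k)                                # k가 나왔는지 방문여부
--     alphabet = list(m)                              # 리스트로 쪼갬
--     for i in alphabet:
--         if not i in k:
--             result.append(i)
--         else:
--             idx = k.index(i)
--             if idx == 0 and d[idx] == 0:
--                 d[idx] = 1
--                 continue
--             elif idx != 0 and d[idx] == 0:
--                 if 0 in d[:idx]:
--                     result.append(i)
--                 else:
--                     d[idx] = 1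
--             else:
--                 result.append(i)
--     return ''.join(result)
-- ===== SOURCE B (Python) =====
-- def Solution(m, k):
--     # first index of each character of k
--     first = {}
--     for j, ch in enumerate(k):
--         if ch not in first:
--             first[ch] = j
--     c = 0                       # length of the already-matched prefix of k
--     out = []
--     for ch in m:
--         if first.get(ch, -1) == c:
--             c += 1
--         else:
--             out.append(ch)
--     return ''.join(out)
-- ===== Notes on version B (the rewrite author's own statement) =====
-- stated objective: faster
-- what changed: Replaces the per-character k.index and d[:idx] scans plus the visited array by a precomputed char-to-first-index dict and a single running matched-prefix counter, exploiting that A's visited flags always form a prefix of ones.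
import Mathlib
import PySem

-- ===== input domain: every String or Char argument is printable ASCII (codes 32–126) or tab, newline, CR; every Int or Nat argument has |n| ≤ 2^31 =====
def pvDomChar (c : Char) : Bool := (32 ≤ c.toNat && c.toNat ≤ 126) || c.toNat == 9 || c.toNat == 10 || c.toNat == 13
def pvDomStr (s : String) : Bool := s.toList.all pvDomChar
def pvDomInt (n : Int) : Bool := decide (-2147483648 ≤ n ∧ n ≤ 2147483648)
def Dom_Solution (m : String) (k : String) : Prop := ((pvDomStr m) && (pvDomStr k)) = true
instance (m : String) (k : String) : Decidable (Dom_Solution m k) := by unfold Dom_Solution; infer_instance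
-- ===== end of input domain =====

-- B replaces A's per-character k.index and d[:idx] scans by a char→first-index dict plus a running matched-prefix counter (objective: faster).

-- ===== PORT A =====
-- loop body of A: state is (result, d); 'i in k' for a single-char i is char membership (exact);
-- d[idx] / d[idx] = 1 use getD/set (idx = k.index(i) is always < len(d), so exact); d[:idx] with idx ≥ 0 is take idx (exact).
def SolutionA_step (k : List Char) (st : List Char × List Int) (i : Char) : List Char × List Int :=
  if ¬ k.contains i then (st.1 ++ [i], st.2)
  else
    let idx := (PySem.List.index? k i).getD 0   -- k.index(i); i ∈ k here, so index? is some _ (no ValueError)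
    if idx = 0 ∧ st.2.getD idx 0 = 0 then (st.1, st.2.set idx 1)
    else if idx ≠ 0 ∧ st.2.getD idx 0 = 0 then
      if (st.2.take idx).contains 0 then (st.1 ++ [i], st.2)
      else (st.1, st.2.set idx 1)
    else (st.1 ++ [i], st.2)

def Solution (m : String) (k : String) : String :=
  let st := m.toList.foldl (SolutionA_step k.toList) ([], List.replicate k.toList.length 0)
  String.ofList st.1                      -- ''.join(result)

-- ===== PORT B =====
-- first = {}; for j, ch in enumerate(k): if ch not in first: first[ch] = j
def SolutionB_first (k : List Char) : PySem.Dict Char Int :=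
  (PySem.List.enumerate k 0).foldl
    (fun d p => if ¬ d.contains p.2 then d.insert p.2 p.1 else d) PySem.Dict.empty

def Solution_alt (m : String) (k : String) : String :=
  let first := SolutionB_first k.toList
  let st := m.toList.foldl
    (fun (st : Int × List Char) ch =>
      if first.getD ch (-1) = st.1 then (st.1 + 1, st.2) else (st.1, st.2 ++ [ch]))
    (0, [])
  String.ofList st.2                      -- ''.join(out)

-- ===== PRECONDITION & SPEC =====
def Spec_Solution (m : String) (k : String) (out : String) : Prop := out = Solution_alt m k
instance (m : String) (k : String) (out : String) : Decidable (Spec_Solution m k out) := by unfold Spec_Solution; infer_instance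

-- ===== CLAIM (what is proved, stated in full; the proofs are below) =====
def Claim_equal_Solution : Prop := ∀ (m : String) (k : String), Dom_Solution m k → Spec_Solution m k (Solution m k)

-- ===== LEMMAS AND PROOFS =====

-- A's visited array is always a prefix of ones: pvOZ L c = [1]*c ++ [0]*(L-c)
def pvOZ (L c : Nat) : List Int := List.replicate c 1 ++ List.replicate (L - c) 0

theorem pvOZ_getD (L c idx : Nat) (h : idx < L) :
    (pvOZ L c).getD idx 0 = if idx < c then 1 else 0 := by
  unfold pvOZ
  rcases Nat.lt_or_ge idx c with hlt | hge
  · rw [List.getD_eq_getElem?_getD, List.getElem?_append_left (by simpa using hlt),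
      List.getElem?_replicate, if_pos hlt, if_pos hlt]
    rfl
  · rw [List.getD_eq_getElem?_getD, List.getElem?_append_right (by simpa using hge),
      List.length_replicate, List.getElem?_replicate,
      if_pos (by omega : idx - c < L - c), if_neg (by omega : ¬ idx < c)]
    rfl

theorem pvOZ_take_contains (L c idx : Nat) (hidx : idx ≤ L) :
    ((pvOZ L c).take idx).contains 0 = decide (c < idx) := by
  unfold pvOZ
  rw [List.take_append, List.take_replicate, List.take_replicate, List.length_replicate]
  simp only [List.contains_eq_mem, List.mem_append, List.mem_replicate, decide_eq_decide]
  constructor <;> intro h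
  · rcases h with ⟨h1, h2⟩ | ⟨h1, h2⟩
    · exact absurd h2 (by norm_num)
    · omega
  · exact Or.inr ⟨by omega, trivial⟩

theorem pvOZ_set (L c : Nat) (h : c < L) : (pvOZ L c).set c 1 = pvOZ L (c + 1) := by
  unfold pvOZ
  rw [List.set_append]
  rw [if_neg (by simp), List.length_replicate, Nat.sub_self]
  have h1 : L - c = (L - (c + 1)) + 1 := by omega
  rw [h1, List.replicate_succ, List.set_cons_zero, List.replicate_succ']
  simp [List.append_assoc]

theorem pvFirst_get?_gen (k : List Char) (ch : Char) (s : Int) (d : PySem.Dict Char Int) :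
    ((PySem.List.enumerate k s).foldl
        (fun d p => if ¬ d.contains p.2 then d.insert p.2 p.1 else d) d).get? ch =
      (match d.get? ch with
       | some v => some v
       | none => (PySem.List.index? k ch).map (fun n => s + (n : Int))) := by
  induction k generalizing s d with
  | nil =>
    rw [PySem.List.enumerate_nil]
    simp only [List.foldl_nil]
    rw [show PySem.List.index? ([] : List Char) ch = none from rfl]
    cases d.get? ch <;> rfl
  | cons x xs ih =>
    rw [PySem.List.enumerate_cons]
    simp only [List.foldl_cons]
    rw [ih]
    by_cases hxc : x = ch
    · subst hxc
      rw [PySem.List.index?_cons_self]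
      by_cases hcont : d.contains x = true
      · rw [show (if ¬ d.contains x then d.insert x s else d) = d by simp [hcont]]
        rw [PySem.Dict.contains_eq_isSome_get?] at hcont
        obtain ⟨v, hv⟩ := Option.isSome_iff_exists.mp hcont
        rw [hv]
      · rw [show (if ¬ d.contains x then d.insert x s else d) = d.insert x s by
          simp [hcont]]
        rw [PySem.Dict.get?_insert_self]
        have hget : d.get? x = none := by
          rw [PySem.Dict.contains_eq_isSome_get?] at hcont
          cases h : d.get? x with
          | none => rfl
          | some v => rw [h] at hcont; simp at hcont
        rw [hget]
        simp
    · rw [PySem.List.index?_cons_of_ne xs hxc]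
      have hstep : ∀ d' : PySem.Dict Char Int, d'.get? ch = d.get? ch →
          (match d'.get? ch with
           | some v => some v
           | none => (PySem.List.index? xs ch).map (fun n => s + 1 + (n : Int))) =
          (match d.get? ch with
           | some v => some v
           | none => ((PySem.List.index? xs ch).map (fun x : Nat => x + 1)).map
               (fun n => s + (n : Int))) := by
        intro d' hd'
        rw [hd']
        cases d.get? ch with
        | some v => rfl
        | none =>
          cases PySem.List.index? xs ch with
          | none => rfl
          | some n =>
            show some (s + 1 + (n : Int)) = some (s + ((n + 1 : Nat) : Int))
            congr 1
            push_cast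
            ring
      by_cases hcont : d.contains x = true
      · rw [show (if ¬ d.contains x then d.insert x s else d) = d by simp [hcont]]
        exact hstep d rfl
      · rw [show (if ¬ d.contains x then d.insert x s else d) = d.insert x s by
          simp [hcont]]
        exact hstep _ (PySem.Dict.get?_insert_of_ne d s (Ne.symm hxc))

theorem pvFirst_get? (k : List Char) (ch : Char) :
    (SolutionB_first k).get? ch = (PySem.List.index? k ch).map (fun n => (n : Int)) := by
  have h := pvFirst_get?_gen k ch 0 PySem.Dict.empty
  unfold SolutionB_first
  rw [h, PySem.Dict.get?_empty]
  cases PySem.List.index? k ch with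
  | none => rfl
  | some n => simp

theorem pvStep_eq (k : List Char) (res : List Char) (c : Nat) (hc : c ≤ k.length) (ch : Char) :
    ∃ c' : Nat, c' ≤ k.length ∧
      SolutionA_step k (res, pvOZ k.length c) ch =
        ((if (SolutionB_first k).getD ch (-1) = (c : Int) then res else res ++ [ch]), pvOZ k.length c') ∧
      (if (SolutionB_first k).getD ch (-1) = (c : Int) then ((c : Int) + 1, res) else ((c : Int), res ++ [ch]))
        = ((c' : Int), (if (SolutionB_first k).getD ch (-1) = (c : Int) then res else res ++ [ch])) := by
  have hgetD : (SolutionB_first k).getD ch (-1)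
      = ((PySem.List.index? k ch).map (fun n => (n : Int))).getD (-1) := by
    simp [PySem.Dict.getD, pvFirst_get?]
  rcases hidx : PySem.List.index? k ch with _ | idx
  · -- ch not in k: both sides append
    have hnm : ch ∉ k := (PySem.List.index?_eq_none_iff k ch).1 hidx
    have hcont : ¬ (k.contains ch = true) := by simpa [List.contains_eq_mem] using hnm
    have hne : ¬ (SolutionB_first k).getD ch (-1) = (c : Int) := by
      rw [hgetD, hidx]; simp
    refine ⟨c, hc, ?_, by rw [if_neg hne, if_neg hne]⟩
    unfold SolutionA_step
    rw [if_pos hcont, if_neg hne]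
  · obtain ⟨hkidx, hkv, _⟩ := PySem.List.getElem_of_index?_eq_some hidx
    have hmem : ch ∈ k := by rw [← hkv]; exact List.getElem_mem hkidx
    have hcont : ¬ ¬ (k.contains ch = true) := by simp [List.contains_eq_mem, hmem]
    have hgd : (SolutionB_first k).getD ch (-1) = (idx : Int) := by rw [hgetD, hidx]; rfl
    have hdidx : (pvOZ k.length c).getD idx 0 = if idx < c then 1 else 0 :=
      pvOZ_getD _ _ _ hkidx
    have htake : ((pvOZ k.length c).take idx).contains 0 = decide (c < idx) :=
      pvOZ_take_contains _ _ _ (Nat.le_of_lt hkidx)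
    by_cases heq : idx = c
    · -- first unmatched position of k: A marks it, B increments the counter
      subst heq
      refine ⟨idx + 1, by omega, ?_, ?_⟩
      · unfold SolutionA_step
        rw [if_neg hcont, if_pos hgd]
        simp only [hidx, Option.getD_some]
        rcases Nat.eq_zero_or_pos idx with h0 | h0
        · rw [if_pos ⟨h0, by rw [hdidx]; simp [h0]⟩, pvOZ_set _ _ hkidx]
        · rw [if_neg (fun h => absurd h.1 (by omega)),
            if_pos ⟨by omega, by rw [hdidx, if_neg (Nat.lt_irrefl idx)]⟩,
            if_neg (by rw [htake]; simp), pvOZ_set _ _ hkidx]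
      · rw [if_pos hgd, if_pos hgd]
        simp
    · -- already matched or not yet reachable: both sides append
      have hne : ¬ (SolutionB_first k).getD ch (-1) = (c : Int) := by
        rw [hgd]; intro h; exact heq (by exact_mod_cast h)
      refine ⟨c, hc, ?_, by rw [if_neg hne, if_neg hne]⟩
      unfold SolutionA_step
      rw [if_neg hcont, if_neg hne]
      simp only [hidx, Option.getD_some]
      rcases Nat.lt_or_ge idx c with hlt | hge
      · -- d[idx] == 1: final else-branch of A appends
        rw [if_neg (fun h => by rw [hdidx, if_pos hlt] at h; exact absurd h.2 one_ne_zero),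
          if_neg (fun h => by rw [hdidx, if_pos hlt] at h; exact absurd h.2 one_ne_zero)]
      · have hgt : c < idx := by omega
        have h0 : idx ≠ 0 := by omega
        rw [if_neg (fun h => h0 h.1),
          if_pos ⟨h0, by rw [hdidx, if_neg (by omega : ¬ idx < c)]⟩,
          if_pos (by rw [htake]; simpa using hgt)]

theorem pvFold_eq (k : List Char) (ms : List Char) (res : List Char) (c : Nat) (hc : c ≤ k.length) :
    (ms.foldl (SolutionA_step k) (res, pvOZ k.length c)).1 =
      (ms.foldl (fun (st : Int × List Char) ch =>
        if (SolutionB_first k).getD ch (-1) = st.1 then (st.1 + 1, st.2) else (st.1, st.2 ++ [ch]))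
        ((c : Int), res)).2 := by
  induction ms generalizing res c with
  | nil => simp
  | cons ch ms ih =>
    obtain ⟨c', hc', hA, hB⟩ := pvStep_eq k res c hc ch
    simp only [List.foldl_cons, hA, hB]
    exact ih _ c' hc'

-- ===== VERDICT (by name: the statement is the Claim_ definition above) =====
theorem Solution_spec : Claim_equal_Solution := by
  intro m k _
  unfold Spec_Solution Solution Solution_alt
  have h := pvFold_eq k.toList m.toList [] 0 (Nat.zero_le _)
  have hoz : pvOZ k.toList.length 0 = List.replicate k.toList.length 0 := by
    simp [pvOZ]
  rw [hoz, Nat.cast_zero] at h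
  exact congrArg String.ofList h
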